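-- pv_equiv track=rewrite | github.com/junyaoshi/frankmocap | ss_utils/data_stage_analysis.py | check_contact_sequence
-- ===== SOURCE A (Python) =====
-- def check_contact_sequence(contact_sequence):
--     """Check if contact sequence is valid"""
--     valid = True
--     contact_keys, contact_vals = list(contact_sequence.keys()), list(contact_sequence.values())
--     first_contact_frame, last_contact_frame = -1, -1
--     for first_contact_idx, frame in enumerate(contact_keys):
--         if contact_sequence[frame] == 1:
--             first_contact_frame = frame
--             break
--     for last_contact_idx, frame in reversed(list(enumerate(contact_keys))):
--         if contact_sequence[frame] == 1:
--             last_contact_frame = frame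
--             break
--     if first_contact_frame == -1 or last_contact_frame == -1:
--         valid = False
--     else:
--         assert first_contact_frame <= last_contact_frame
--         for idx in range(first_contact_idx, last_contact_idx):
--             if contact_vals[idx] == 0:
--                 valid = False
--
--     return valid, first_contact_frame, last_contact_frame
-- ===== SOURCE B (Python) =====
-- def check_contact_sequence(contact_sequence):
--     """Single pass over the items: track first/last contact frame and whether a
--     zero has been seen since the first contact; a later contact after such a
--     zero marks the sequence invalid."""
--     valid = True
--     first_frame, last_frame = -1, -1
--     seen_contact = False
--     zero_since_contact = False
--     for frame, val in contact_sequence.items():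
--         if val == 1:
--             if seen_contact:
--                 if zero_since_contact:
--                     valid = False
--             else:
--                 first_frame = frame
--                 seen_contact = True
--             last_frame = frame
--         elif val == 0 and seen_contact:
--             zero_since_contact = True
--     if first_frame == -1 or last_frame == -1:
--         valid = False
--     return valid, first_frame, last_frame
-- ===== Notes on version B (the rewrite author's own statement) =====
-- stated objective: simpler
-- what changed: Replaced A's three passes (forward scan for the first contact, reversed scan for the last, then an index-range rescan of the values for gaps) by one pass over the items maintaining first/last frame and a zero-seen-since-contact flag; the final frame==-1 check is kept so a contact keyed -1 still yields invalid, as in A.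
import Mathlib
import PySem

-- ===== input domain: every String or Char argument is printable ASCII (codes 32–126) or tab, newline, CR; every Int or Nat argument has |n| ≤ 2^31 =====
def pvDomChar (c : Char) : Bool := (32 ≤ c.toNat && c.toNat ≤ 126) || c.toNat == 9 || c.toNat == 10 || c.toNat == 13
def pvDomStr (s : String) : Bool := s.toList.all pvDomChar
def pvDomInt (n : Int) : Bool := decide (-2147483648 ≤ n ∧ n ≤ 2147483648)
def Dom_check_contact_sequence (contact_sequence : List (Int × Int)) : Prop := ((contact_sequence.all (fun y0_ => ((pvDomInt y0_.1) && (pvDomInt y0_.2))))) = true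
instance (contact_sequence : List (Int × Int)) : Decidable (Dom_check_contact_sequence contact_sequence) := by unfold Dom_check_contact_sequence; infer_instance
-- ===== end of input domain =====

-- B replaces A's three passes (forward scan, reversed scan, index-range rescan) by one
-- pass over the items with first/last-frame and zero-since-contact state (objective: simpler).

-- ===== PORT A =====
-- dict lookup contact_sequence[frame]: first matching key in the association list
def csLookup (cs : List (Int × Int)) (k : Int) : Option Int :=
  (cs.find? (fun q => q.1 == k)).map Prod.snd

-- enumerate(contact_keys)
def enumFrom (n : Nat) : List Int → List (Nat × Int)
  | [] => []
  | k :: ks => (n, k) :: enumFrom (n + 1) ks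

-- the shared shape of A's two break-loops: first (idx, frame) whose dict value is 1
def scanFirst (cs : List (Int × Int)) : List (Nat × Int) → Option (Nat × Int)
  | [] => none
  | (i, f) :: rest => if csLookup cs f = some 1 then some (i, f) else scanFirst cs rest

def check_contact_sequence (contact_sequence : List (Int × Int)) : Bool × Int × Int :=
  let contact_keys := contact_sequence.map Prod.fst
  let contact_vals := contact_sequence.map Prod.snd
  let fst? := scanFirst contact_sequence (enumFrom 0 contact_keys)
  let lst? := scanFirst contact_sequence (enumFrom 0 contact_keys).reverse
  let first_contact_frame := (fst?.map Prod.snd).getD (-1)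
  let last_contact_frame := (lst?.map Prod.snd).getD (-1)
  if first_contact_frame = -1 ∨ last_contact_frame = -1 then
    (false, first_contact_frame, last_contact_frame)
  else
    -- Python: assert first_contact_frame <= last_contact_frame (raises exactly outside Pre_)
    let fi := (fst?.map Prod.fst).getD 0
    let lj := (lst?.map Prod.fst).getD 0
    let valid := (List.range' fi (lj - fi)).foldl
      (fun v idx => if contact_vals.getD idx 1 == 0 then false else v) true
    (valid, first_contact_frame, last_contact_frame)

-- ===== PORT B =====
-- state: (valid, first_frame, last_frame, seen_contact, zero_since_contact)
def bstep (s : Bool × Int × Int × Bool × Bool) (q : Int × Int) : Bool × Int × Int × Bool × Bool :=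
  match s with
  | (valid, first, last, seen, zero) =>
    if q.2 = 1 then
      if seen then ((if zero then false else valid), first, q.1, seen, zero)
      else (valid, q.1, q.1, true, zero)
    else if q.2 = 0 ∧ seen = true then (valid, first, last, seen, true)
    else s

def check_contact_sequence_alt (contact_sequence : List (Int × Int)) : Bool × Int × Int :=
  match contact_sequence.foldl bstep (true, -1, -1, false, false) with
  | (valid, first, last, _, _) =>
    if first = -1 ∨ last = -1 then (false, first, last) else (valid, first, last)

-- ===== PRECONDITION & SPEC =====
def firstOne (cs : List (Int × Int)) : Option (Int × Int) := cs.find? (fun q => q.2 == 1)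
def lastOne (cs : List (Int × Int)) : Option (Int × Int) := cs.reverse.find? (fun q => q.2 == 1)

def preOrderOk (cs : List (Int × Int)) : Bool :=
  match firstOne cs, lastOne cs with
  | some p, some r => decide (p.1 ≤ r.1)
  | _, _ => true

-- Pre_ excludes (a) association lists with duplicate keys, which cannot arise from the
-- Python dict argument, and (b) inputs whose first contact key exceeds their last contact
-- key, on which A's `assert` raises AssertionError (so A returns on no excluded input).
def Pre_check_contact_sequence (contact_sequence : List (Int × Int)) : Prop :=
  (contact_sequence.map Prod.fst).Nodup ∧ preOrderOk contact_sequence = true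
instance (contact_sequence : List (Int × Int)) : Decidable (Pre_check_contact_sequence contact_sequence) := by unfold Pre_check_contact_sequence; infer_instance

def pvWitness_check_contact_sequence : (List (Int × Int)) := [(0, 1), (1, 0), (2, 1)]

def Spec_check_contact_sequence (contact_sequence : List (Int × Int)) (out : Bool × Int × Int) : Prop := out = check_contact_sequence_alt contact_sequence
instance (contact_sequence : List (Int × Int)) (out : Bool × Int × Int) : Decidable (Spec_check_contact_sequence contact_sequence out) := by unfold Spec_check_contact_sequence; infer_instance

-- ===== CLAIM (what is proved, stated in full; the proofs are below) =====
def Claim_equal_check_contact_sequence : Prop := ∀ (contact_sequence : List (Int × Int)), Dom_check_contact_sequence contact_sequence → Pre_check_contact_sequence contact_sequence → Spec_check_contact_sequence contact_sequence (check_contact_sequence contact_sequence)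


-- ===== LEMMAS AND PROOFS =====

-- nodup keys: looking up a member's key yields that member's value
theorem lookup_mem {cs : List (Int × Int)} {q : Int × Int}
    (h : (cs.map Prod.fst).Nodup) (hq : q ∈ cs) : csLookup cs q.1 = some q.2 := by
  induction cs with
  | nil => cases hq
  | cons x t ih =>
    simp only [List.map_cons, List.nodup_cons] at h
    rcases List.mem_cons.1 hq with rfl | hmem
    · simp [csLookup, List.find?]
    · have hne : (x.1 == q.1) = false := by
        refine beq_eq_false_iff_ne.2 ?_
        intro he
        exact h.1 (he ▸ List.mem_map_of_mem hmem)
      simpa [csLookup, List.find?, hne] using ih h.2 hmem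

theorem enumFrom_append (n : Nat) (l r : List Int) :
    enumFrom n (l ++ r) = enumFrom n l ++ enumFrom (n + l.length) r := by
  induction l generalizing n with
  | nil => simp [enumFrom]
  | cons x xs ih =>
    have harith : n + 1 + xs.length = n + (xs.length + 1) := by omega
    simp [enumFrom, ih, harith]

theorem mem_enumFrom {pr : Nat × Int} {n : Nat} {l : List Int}
    (h : pr ∈ enumFrom n l) : pr.2 ∈ l := by
  induction l generalizing n with
  | nil => simp [enumFrom] at h
  | cons x xs ih =>
    rcases List.mem_cons.1 h with rfl | hm
    · simp
    · exact List.mem_cons.2 (Or.inr (ih hm))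

theorem scanFirst_skip {cs : List (Int × Int)} {pairs : List (Nat × Int)} (rest : List (Nat × Int))
    (h : ∀ pr ∈ pairs, csLookup cs pr.2 ≠ some 1) :
    scanFirst cs (pairs ++ rest) = scanFirst cs rest := by
  induction pairs with
  | nil => rfl
  | cons pr t ih =>
    obtain ⟨i, f⟩ := pr
    have hf : csLookup cs f ≠ some 1 := h (i, f) (List.mem_cons_self ..)
    simp only [List.cons_append, scanFirst, if_neg hf]
    exact ih fun x hx => h x (List.mem_cons.2 (Or.inr hx))

theorem foldl_if_any (P : Nat → Bool) (l : List Nat) (b : Bool) :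
    l.foldl (fun v idx => if P idx then false else v) b = (b && !(l.any P)) := by
  induction l generalizing b with
  | nil => simp
  | cons x t ih =>
    rw [List.foldl_cons, List.any_cons]
    cases hP : P x
    · rw [if_neg (by simp), ih]; simp
    · rw [if_pos (by simp), ih]; simp

theorem getD_append_len (pre : List Int) (y : Int) (z : List Int) :
    (pre ++ y :: z).getD pre.length 1 = y := by
  simp

theorem range'_any_vals (mid : List (Int × Int)) (pre : List Int) (tail : List Int) :
    (List.range' pre.length mid.length).any
        (fun t => (pre ++ (mid.map Prod.snd ++ tail)).getD t 1 == 0)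
      = mid.any (fun q => q.2 == 0) := by
  induction mid generalizing pre with
  | nil => simp
  | cons x m ih =>
    have h1 : (pre ++ (x.2 :: (List.map Prod.snd m ++ tail))).getD pre.length 1 = x.2 :=
      getD_append_len pre x.2 (List.map Prod.snd m ++ tail)
    have e1 : pre ++ (x.2 :: (List.map Prod.snd m ++ tail))
        = (pre ++ [x.2]) ++ (List.map Prod.snd m ++ tail) := by simp
    rw [List.map_cons, List.length_cons, List.range'_succ, List.any_cons, List.any_cons,
        List.cons_append, h1]
    have e2 : (List.range' (pre.length + 1) m.length).any
        (fun t => (pre ++ (x.2 :: (List.map Prod.snd m ++ tail))).getD t 1 == 0)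
        = m.any fun q => q.2 == 0 := by
      rw [e1]
      have e3 : pre.length + 1 = (pre ++ [x.2]).length := by simp
      rw [e3, ih (pre ++ [x.2])]
    rw [e2]

-- B: a prefix with no contacts leaves the initial state unchanged
theorem foldl_b_no_one_init {l : List (Int × Int)} (h : ∀ q ∈ l, q.2 ≠ 1) :
    l.foldl bstep (true, -1, -1, false, false) = (true, -1, -1, false, false) := by
  induction l with
  | nil => rfl
  | cons x t ih =>
    have hx : x.2 ≠ 1 := h x (List.mem_cons_self ..)
    have : bstep (true, -1, -1, false, false) x = (true, -1, -1, false, false) := by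
      simp [bstep, hx]
    rw [List.foldl_cons, this]
    exact ih fun q hq => h q (List.mem_cons.2 (Or.inr hq))

-- B: a suffix with no contacts only possibly sets the zero flag
theorem foldl_b_no_one_seen {l : List (Int × Int)} (h : ∀ q ∈ l, q.2 ≠ 1)
    (v : Bool) (fr la : Int) (z : Bool) :
    ∃ z', l.foldl bstep (v, fr, la, true, z) = (v, fr, la, true, z') := by
  induction l generalizing z with
  | nil => exact ⟨z, rfl⟩
  | cons x t ih =>
    have hx : x.2 ≠ 1 := h x (List.mem_cons_self ..)
    have ht : ∀ q ∈ t, q.2 ≠ 1 := fun q hq => h q (List.mem_cons.2 (Or.inr hq))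
    by_cases h0 : x.2 = 0
    · rw [List.foldl_cons]
      have : bstep (v, fr, la, true, z) x = (v, fr, la, true, true) := by simp [bstep, h0]
      rw [this]; exact ih ht true
    · rw [List.foldl_cons]
      have : bstep (v, fr, la, true, z) x = (v, fr, la, true, z) := by simp [bstep, hx, h0]
      rw [this]; exact ih ht z

-- B: once seen ∧ zero hold they persist; valid/last may change
theorem foldl_b_zero_persists (l : List (Int × Int)) (v : Bool) (fr la : Int) :
    ∃ v' la', l.foldl bstep (v, fr, la, true, true) = (v', fr, la', true, true) := by
  induction l generalizing v la with
  | nil => exact ⟨v, la, rfl⟩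
  | cons x t ih =>
    by_cases h1 : x.2 = 1
    · rw [List.foldl_cons]
      have : bstep (v, fr, la, true, true) x = (false, fr, x.1, true, true) := by
        simp [bstep, h1]
      rw [this]; exact ih false x.1
    · by_cases h0 : x.2 = 0
      · rw [List.foldl_cons]
        have : bstep (v, fr, la, true, true) x = (v, fr, la, true, true) := by
          simp [bstep, h0]
        rw [this]; exact ih v la
      · rw [List.foldl_cons]
        have : bstep (v, fr, la, true, true) x = (v, fr, la, true, true) := by
          simp [bstep, h1, h0]
        rw [this]; exact ih v la

-- B: through the middle and the closing contact r, valid picks up exactly "no zero in mid"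
theorem foldl_b_mid {r : Int × Int} (hr : r.2 = 1) (mid : List (Int × Int))
    (v : Bool) (fr la : Int) :
    (mid ++ [r]).foldl bstep (v, fr, la, true, false)
      = ((v && !(mid.any (fun q => q.2 == 0))), fr, r.1, true, mid.any (fun q => q.2 == 0)) := by
  induction mid generalizing v la with
  | nil => simp [bstep, hr]
  | cons x m ih =>
    by_cases h1 : x.2 = 1
    · have hstep : bstep (v, fr, la, true, false) x = (v, fr, x.1, true, false) := by
        simp [bstep, h1]
      have hx0 : (x.2 == 0) = false := by simp [h1]
      rw [List.cons_append, List.foldl_cons, hstep, ih v x.1, List.any_cons, hx0]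
      simp
    · by_cases h0 : x.2 = 0
      · have hstep : bstep (v, fr, la, true, false) x = (v, fr, la, true, true) := by
          simp [bstep, h0]
        obtain ⟨v', la', hm⟩ := foldl_b_zero_persists m v fr la
        have hrstep : bstep (v', fr, la', true, true) r = (false, fr, r.1, true, true) := by
          simp [bstep, hr]
        rw [List.cons_append, List.foldl_cons, hstep, List.foldl_append, hm,
          List.foldl_cons, hrstep, List.any_cons]
        simp [h0]
      · have hstep : bstep (v, fr, la, true, false) x = (v, fr, la, true, false) := by
          simp [bstep, h1, h0]
        have hx0 : (x.2 == 0) = false := by simp [h0]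
        rw [List.cons_append, List.foldl_cons, hstep, ih v la, List.any_cons, hx0]
        simp

-- decomposition by the first contact
theorem decomp_first (cs : List (Int × Int)) :
    (∀ q ∈ cs, q.2 ≠ 1) ∨
      ∃ l₁ p l₂, cs = l₁ ++ p :: l₂ ∧ p.2 = 1 ∧ ∀ q ∈ l₁, q.2 ≠ 1 := by
  induction cs with
  | nil => exact Or.inl (by simp)
  | cons x t ih =>
    by_cases hx : x.2 = 1
    · exact Or.inr ⟨[], x, t, by simp, hx, by simp⟩
    · rcases ih with hno | ⟨l₁, p, l₂, rfl, hp, hl₁⟩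
      · refine Or.inl ?_
        intro q hq
        rcases List.mem_cons.1 hq with rfl | hm
        · exact hx
        · exact hno q hm
      · refine Or.inr ⟨x :: l₁, p, l₂, by simp, hp, ?_⟩
        intro q hq
        rcases List.mem_cons.1 hq with rfl | hm
        · exact hx
        · exact hl₁ q hm

-- decomposition by the last contact
theorem decomp_last (cs : List (Int × Int)) :
    (∀ q ∈ cs, q.2 ≠ 1) ∨
      ∃ m r t, cs = m ++ r :: t ∧ r.2 = 1 ∧ ∀ q ∈ t, q.2 ≠ 1 := by
  induction cs with
  | nil => exact Or.inl (by simp)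
  | cons x t ih =>
    rcases ih with hno | ⟨m, r, tt, rfl, hr, htt⟩
    · by_cases hx : x.2 = 1
      · exact Or.inr ⟨[], x, t, by simp, hx, hno⟩
      · refine Or.inl ?_
        intro q hq
        rcases List.mem_cons.1 hq with rfl | hm
        · exact hx
        · exact hno q hm
    · exact Or.inr ⟨x :: m, r, tt, by simp, hr, htt⟩

-- ===== VERDICT (by name: the statement is the Claim_ definition above) =====
theorem keyfail {cs l : List (Int × Int)} {n : Nat}
    (hnd : (cs.map Prod.fst).Nodup) (hsub : ∀ q ∈ l, q ∈ cs) (hno : ∀ q ∈ l, q.2 ≠ 1) :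
    ∀ pr ∈ enumFrom n (l.map Prod.fst), csLookup cs pr.2 ≠ some 1 := by
  intro pr hpr
  rcases List.mem_map.1 (mem_enumFrom hpr) with ⟨q, hq, hq2⟩
  rw [← hq2, lookup_mem hnd (hsub q hq)]
  simp [hno q hq]

theorem scanA_first {l₁ l₂ : List (Int × Int)} {p : Int × Int}
    (hnd : ((l₁ ++ p :: l₂).map Prod.fst).Nodup)
    (hl₁ : ∀ q ∈ l₁, q.2 ≠ 1) (hp1 : p.2 = 1) :
    scanFirst (l₁ ++ p :: l₂) (enumFrom 0 ((l₁ ++ p :: l₂).map Prod.fst))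
      = some (l₁.length, p.1) := by
  have hlkp : csLookup (l₁ ++ p :: l₂) p.1 = some 1 := by
    rw [lookup_mem hnd (by simp), hp1]
  have hkeys : (l₁ ++ p :: l₂).map Prod.fst = l₁.map Prod.fst ++ p.1 :: l₂.map Prod.fst := by
    simp
  rw [hkeys, enumFrom_append,
    scanFirst_skip _ (keyfail hnd (fun q hq => by simp [hq]) hl₁)]
  simp [enumFrom, scanFirst, hlkp]

theorem scanA_last {m l₂ : List (Int × Int)} {r : Int × Int}
    (hnd : ((m ++ r :: l₂).map Prod.fst).Nodup)
    (hl₂ : ∀ q ∈ l₂, q.2 ≠ 1) (hr1 : r.2 = 1) :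
    scanFirst (m ++ r :: l₂) (enumFrom 0 ((m ++ r :: l₂).map Prod.fst)).reverse
      = some (m.length, r.1) := by
  have hlkr : csLookup (m ++ r :: l₂) r.1 = some 1 := by
    rw [lookup_mem hnd (by simp), hr1]
  have hkeys : (m ++ r :: l₂).map Prod.fst = m.map Prod.fst ++ r.1 :: l₂.map Prod.fst := by
    simp
  have hrev : (enumFrom 0 ((m ++ r :: l₂).map Prod.fst)).reverse
      = (enumFrom (m.length + 1) (l₂.map Prod.fst)).reverse
        ++ (m.length, r.1) :: (enumFrom 0 (m.map Prod.fst)).reverse := by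
    rw [hkeys, enumFrom_append]
    simp [enumFrom]
  have hfail : ∀ pr ∈ (enumFrom (m.length + 1) (l₂.map Prod.fst)).reverse,
      csLookup (m ++ r :: l₂) pr.2 ≠ some 1 := by
    intro pr hpr
    exact keyfail hnd (fun q hq => by simp [hq]) hl₂ pr (List.mem_reverse.1 hpr)
  rw [hrev, scanFirst_skip _ hfail]
  simp [scanFirst, hlkr]

theorem valid_A (l₁ mid l₂' : List (Int × Int)) (p r : Int × Int) (hp1 : p.2 = 1) :
    (List.range' l₁.length ((l₁ ++ p :: mid).length - l₁.length)).foldl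
      (fun v idx =>
        if ((l₁ ++ p :: (mid ++ r :: l₂')).map Prod.snd).getD idx 1 == 0 then false else v) true
    = !(mid.any fun q => q.2 == 0) := by
  have hn : (l₁ ++ p :: mid).length - l₁.length = mid.length + 1 := by simp
  rw [hn, foldl_if_any, List.range'_succ, List.any_cons]
  have h1 : ((l₁ ++ p :: (mid ++ r :: l₂')).map Prod.snd).getD l₁.length 1 = p.2 := by
    have hv : (l₁ ++ p :: (mid ++ r :: l₂')).map Prod.snd
        = l₁.map Prod.snd ++ p.2 :: (mid.map Prod.snd ++ (r.2 :: l₂'.map Prod.snd)) := by simp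
    rw [hv]
    simp
  rw [h1, hp1]
  have h2 : (List.range' (l₁.length + 1) mid.length).any
      (fun t => ((l₁ ++ p :: (mid ++ r :: l₂')).map Prod.snd).getD t 1 == 0)
      = mid.any fun q => q.2 == 0 := by
    have e1 : (l₁ ++ p :: (mid ++ r :: l₂')).map Prod.snd
        = (l₁.map Prod.snd ++ [p.2]) ++ (mid.map Prod.snd ++ (r.2 :: l₂'.map Prod.snd)) := by
      simp
    have e2 : l₁.length + 1 = (l₁.map Prod.snd ++ [p.2]).length := by simp
    rw [e1, e2, range'_any_vals]
  rw [h2]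
  simp

theorem check_contact_sequence_spec : Claim_equal_check_contact_sequence := by
  intro cs _ hpre
  obtain ⟨hnd, -⟩ := hpre
  unfold Spec_check_contact_sequence
  rcases decomp_first cs with hno | ⟨l₁, p, l₂, rfl, hp1, hl₁⟩
  · -- no contact at all
    have hA : scanFirst cs (enumFrom 0 (cs.map Prod.fst)) = none := by
      have := scanFirst_skip (cs := cs) [] (keyfail (n := 0) hnd (fun q hq => hq) hno)
      simpa [scanFirst] using this
    have hAr : scanFirst cs (enumFrom 0 (cs.map Prod.fst)).reverse = none := by
      have hfail : ∀ pr ∈ (enumFrom 0 (cs.map Prod.fst)).reverse,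
          csLookup cs pr.2 ≠ some 1 := fun pr hpr =>
        keyfail hnd (fun q hq => hq) hno pr (List.mem_reverse.1 hpr)
      have := scanFirst_skip (cs := cs) [] hfail
      simpa [scanFirst] using this
    simp [check_contact_sequence, check_contact_sequence_alt, hA, hAr,
      foldl_b_no_one_init hno]
  · rcases decomp_last l₂ with hno₂ | ⟨mid, r, l₂', rfl, hr1, hl₂'⟩
    · -- exactly one contact block boundary: p is both first and last contact
      have hF := scanA_first hnd hl₁ hp1
      have hR := scanA_last (m := l₁) (l₂ := l₂) (r := p) hnd hno₂ hp1
      have hstep : bstep (true, -1, -1, false, false) p = (true, p.1, p.1, true, false) := by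
        simp [bstep, hp1]
      obtain ⟨z', hz⟩ := foldl_b_no_one_seen hno₂ true p.1 p.1 false
      have hB : (l₁ ++ p :: l₂).foldl bstep (true, -1, -1, false, false)
          = (true, p.1, p.1, true, z') := by
        rw [List.foldl_append, foldl_b_no_one_init hl₁, List.foldl_cons, hstep, hz]
      simp only [check_contact_sequence, check_contact_sequence_alt, hF, hR, hB,
        Option.map_some, Option.getD_some, Nat.sub_self, List.range'_zero, List.foldl_nil]
    · -- first contact p, last contact r
      have hF := scanA_first (l₂ := mid ++ r :: l₂') hnd hl₁ hp1
      have hass : (l₁ ++ p :: mid) ++ r :: l₂' = l₁ ++ p :: (mid ++ r :: l₂') := by simp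
      have hnd' : (((l₁ ++ p :: mid) ++ r :: l₂').map Prod.fst).Nodup := by
        rw [hass]; exact hnd
      have hR := scanA_last (m := l₁ ++ p :: mid) (l₂ := l₂') (r := r) hnd' hl₂' hr1
      rw [hass] at hR
      have hstep : bstep (true, -1, -1, false, false) p = (true, p.1, p.1, true, false) := by
        simp [bstep, hp1]
      have hass2 : mid ++ r :: l₂' = (mid ++ [r]) ++ l₂' := by simp
      obtain ⟨z', hz⟩ := foldl_b_no_one_seen hl₂'
        (true && !(mid.any fun q => q.2 == 0)) p.1 r.1 (mid.any fun q => q.2 == 0)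
      have hB : (l₁ ++ p :: (mid ++ r :: l₂')).foldl bstep (true, -1, -1, false, false)
          = ((true && !(mid.any fun q => q.2 == 0)), p.1, r.1, true, z') := by
        rw [List.foldl_append, foldl_b_no_one_init hl₁, List.foldl_cons, hstep, hass2,
          List.foldl_append, foldl_b_mid hr1 mid true p.1 p.1, hz]
      have hval := valid_A l₁ mid l₂' p r hp1
      simp only [check_contact_sequence, check_contact_sequence_alt, hF, hR, hB,
        Option.map_some, Option.getD_some]
      rw [hval]
      by_cases hpm : p.1 = -1 <;> by_cases hrm : r.1 = -1 <;> simp [hpm, hrm]
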